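-- pv_equiv track=rewrite | github.com/NotMyThingy/mooc-ohjelmointi-21 | osa05-11_kertomat/src/kertomat.py | kertomat
-- ===== SOURCE A (Python) =====
-- def kertomat(n: int):
--     luvut = {}
--     for luku in range(1, n+1):
--         kertoma = 1
--         for i in range(1, luku):
--             kertoma *= i+1
--         luvut[luku] = kertoma
--     return luvut
-- ===== SOURCE B (Python) =====
-- def kertomat(n: int):
--     luvut = {}
--     kertoma = 1
--     for luku in range(1, n + 1):
--         kertoma *= luku
--         luvut[luku] = kertoma
--     return luvut
-- ===== Notes on version B (the rewrite author's own statement) =====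
-- stated objective: faster
-- what changed: Replaced the nested loop that recomputes each factorial from scratch with a single pass that maintains a running product, so each entry costs one multiplication.
import Mathlib
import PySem

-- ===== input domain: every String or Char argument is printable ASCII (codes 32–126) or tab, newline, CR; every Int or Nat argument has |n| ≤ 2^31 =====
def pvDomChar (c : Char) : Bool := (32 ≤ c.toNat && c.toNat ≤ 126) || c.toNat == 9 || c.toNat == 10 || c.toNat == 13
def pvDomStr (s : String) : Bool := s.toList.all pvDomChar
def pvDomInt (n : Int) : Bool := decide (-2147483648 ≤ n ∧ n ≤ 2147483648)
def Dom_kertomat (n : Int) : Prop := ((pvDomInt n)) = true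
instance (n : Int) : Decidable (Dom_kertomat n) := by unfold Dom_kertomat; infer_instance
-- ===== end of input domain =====

-- B replaces A's nested loop (each factorial recomputed from scratch) by a single
-- pass with a running product: one multiplication per entry (objective: faster).

-- ===== PORT A =====
def kertomat (n : Int) : List (Int × Int) :=
  ((PySem.List.pyRange 1 (n + 1) 1).foldl
    (fun (luvut : PySem.Dict Int Int) luku =>
      let kertoma := (PySem.List.pyRange 1 luku 1).foldl (fun kertoma i => kertoma * (i + 1)) 1
      luvut.insert luku kertoma)
    PySem.Dict.empty).items

-- ===== PORT B =====
def kertomat_alt (n : Int) : List (Int × Int) :=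
  ((PySem.List.pyRange 1 (n + 1) 1).foldl
    (fun (st : Int × PySem.Dict Int Int) luku => (st.1 * luku, st.2.insert luku (st.1 * luku)))
    (1, PySem.Dict.empty)).2.items

-- ===== PRECONDITION & SPEC =====
def Spec_kertomat (n : Int) (out : List (Int × Int)) : Prop := out = kertomat_alt n
instance (n : Int) (out : List (Int × Int)) : Decidable (Spec_kertomat n out) := by unfold Spec_kertomat; infer_instance

-- ===== CLAIM (what is proved, stated in full; the proofs are below) =====
def Claim_equal_kertomat : Prop := ∀ (n : Int), Dom_kertomat n → Spec_kertomat n (kertomat n)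

-- ===== LEMMAS AND PROOFS =====

-- the common yardstick: the dict of factorials built by plain inserts
def factDict (b : Int) : PySem.Dict Int Int :=
  (PySem.List.pyRange 1 b 1).foldl
    (fun d j => d.insert j ((j.toNat).factorial : Int)) PySem.Dict.empty

-- A's inner loop computes the factorial
lemma inner_fact (k : Nat) :
    (PySem.List.pyRange 1 (1 + (k : Int)) 1).foldl (fun kertoma i => kertoma * (i + 1)) 1
      = ((k + 1).factorial : Int) := by
  induction k with
  | zero => simp [PySem.List.pyRange_one_eq_nil]
  | succ k ih =>
      have h : (1 : Int) ≤ 1 + (k : Int) := by omega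
      rw [show (1 : Int) + (((k : Nat) + 1 : Nat) : Int) = (1 + (k : Int)) + 1 by push_cast; ring,
        PySem.List.pyRange_one_succ_right h]
      rw [List.foldl_append, ih]
      simp only [List.foldl_cons, List.foldl_nil]
      push_cast [Nat.factorial_succ]
      ring

-- A's fold equals the plain factorial-insert fold
lemma a_fold_eq (n : Int) :
    (PySem.List.pyRange 1 (n + 1) 1).foldl
      (fun (luvut : PySem.Dict Int Int) luku =>
        let kertoma := (PySem.List.pyRange 1 luku 1).foldl (fun kertoma i => kertoma * (i + 1)) 1
        luvut.insert luku kertoma)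
      PySem.Dict.empty = factDict (n + 1) := by
  unfold factDict
  apply PySem.List.foldl_congr_mem
  intro acc x hx
  rcases (PySem.List.mem_pyRange_one.mp hx) with ⟨h1, _⟩
  have hk : x = 1 + ((x - 1).toNat : Int) := by omega
  simp only
  rw [hk, inner_fact]
  have hnt : ((1 : Int) + ((x - 1).toNat : Int)).toNat = (x - 1).toNat + 1 := by omega
  rw [hnt]

-- B's fold: running product is the factorial, and the dict is factDict
lemma b_fold_eq (k : Nat) :
    (PySem.List.pyRange 1 (1 + (k : Int)) 1).foldl
      (fun (st : Int × PySem.Dict Int Int) luku => (st.1 * luku, st.2.insert luku (st.1 * luku)))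
      (1, PySem.Dict.empty)
      = ((k.factorial : Int), factDict (1 + (k : Int))) := by
  induction k with
  | zero => simp [PySem.List.pyRange_one_eq_nil, factDict]
  | succ k ih =>
      have h : (1 : Int) ≤ 1 + (k : Int) := by omega
      push_cast
      rw [show (1 : Int) + ((k : Int) + 1) = (1 + (k : Int)) + 1 by ring,
        PySem.List.pyRange_one_succ_right h]
      unfold factDict
      rw [PySem.List.pyRange_one_succ_right h]
      rw [List.foldl_append, List.foldl_append]
      rw [ih]
      unfold factDict
      simp only [List.foldl_cons, List.foldl_nil]
      have hnt : ((1 : Int) + (k : Int)).toNat = k + 1 := by omega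
      rw [Prod.mk.injEq, hnt]
      constructor
      · push_cast [Nat.factorial_succ]; ring
      · congr 1
        push_cast [Nat.factorial_succ]; ring

-- ===== VERDICT (by name: the statement is the Claim_ definition above) =====
theorem kertomat_spec : Claim_equal_kertomat := by
  intro n _
  unfold Spec_kertomat kertomat kertomat_alt
  rw [a_fold_eq]
  by_cases hn : n ≤ 0
  · rw [PySem.List.pyRange_one_eq_nil (by omega)]
    simp [factDict, PySem.List.pyRange_one_eq_nil (show n + 1 ≤ 1 by omega)]
  · have hk : n + 1 = 1 + (n.toNat : Int) := by omega
    rw [hk, b_fold_eq]
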